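-- pv_equiv track=rewrite | github.com/RUNSTR-LLC/Level-Fitness-iOS | agents/commit-analyzer.py | _categorize_commit
-- ===== SOURCE A (Python) =====
-- from typing import Dict, List, Optional, Tuple
--
-- def _categorize_commit(message: str, files_changed: List[str]) -> str:
--     """Categorize commit based on message and files."""
--     message_lower = message.lower()
--
--     # Check message content
--     if any(keyword in message_lower for keyword in ["constraint", "layout", "autolayout"]):
--         return "UI/Layout"
--     elif any(keyword in message_lower for keyword in ["navigation", "push", "present"]):
--         return "Navigation"
--     elif any(keyword in message_lower for keyword in ["build", "compile", "xcode"]):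
--         return "Build/Compilation"
--     elif any(keyword in message_lower for keyword in ["api", "supabase", "network"]):
--         return "API Integration"
--
--     # Check file patterns
--     if files_changed:
--         if any('View' in f or 'UI' in f for f in files_changed):
--             return "UI/Layout"
--         elif any('Service' in f or 'Manager' in f for f in files_changed):
--             return "Architecture"
--         elif any('Controller' in f for f in files_changed):
--             return "Navigation"
--
--     return "General"
-- ===== SOURCE B (Python) =====
-- from typing import List
--
-- # One unified rule table in REVERSE priority order (lowest priority first).
-- # A later matching rule overwrites an earlier one, so the final value is the
-- # highest-priority match; message rules come after file rules, so they win.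
-- RULES = [
--     ("file", ["Controller"], "Navigation"),
--     ("file", ["Service", "Manager"], "Architecture"),
--     ("file", ["View", "UI"], "UI/Layout"),
--     ("msg", ["api", "supabase", "network"], "API Integration"),
--     ("msg", ["build", "compile", "xcode"], "Build/Compilation"),
--     ("msg", ["navigation", "push", "present"], "Navigation"),
--     ("msg", ["constraint", "layout", "autolayout"], "UI/Layout"),
-- ]
--
--
-- def _categorize_commit(message: str, files_changed: List[str]) -> str:
--     """Categorize commit: one fold over a reverse-priority rule table,
--     last matching rule wins (no early returns, no staged cascade)."""
--     ml = message.lower()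
--     result = "General"
--     for kind, patterns, category in RULES:
--         haystacks = [ml] if kind == "msg" else (files_changed or [])
--         if any(p in h for h in haystacks for p in patterns):
--             result = category
--     return result
-- ===== Notes on version B (the rewrite author's own statement) =====
-- stated objective: alternative
-- what changed: B replaces A's two-stage early-return if/elif cascade with a single fold over one unified rule table stored in reverse priority order, where a later matching rule overwrites the accumulator (last match wins), so message rules override file rules without any early return or staged checks.
import Mathlib
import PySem

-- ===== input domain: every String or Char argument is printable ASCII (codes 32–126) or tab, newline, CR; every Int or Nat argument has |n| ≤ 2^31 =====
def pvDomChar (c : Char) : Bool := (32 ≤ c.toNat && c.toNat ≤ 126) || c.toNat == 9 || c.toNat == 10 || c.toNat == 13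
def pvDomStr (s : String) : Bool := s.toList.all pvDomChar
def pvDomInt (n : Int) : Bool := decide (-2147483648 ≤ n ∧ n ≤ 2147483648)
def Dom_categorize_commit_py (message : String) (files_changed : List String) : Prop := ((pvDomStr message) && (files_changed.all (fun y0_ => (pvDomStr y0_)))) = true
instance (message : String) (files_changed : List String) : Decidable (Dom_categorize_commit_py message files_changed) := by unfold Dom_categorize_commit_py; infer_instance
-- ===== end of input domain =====

-- B folds once over a unified reverse-priority rule table with a last-match-wins accumulator instead of A's two-stage early-return elif cascade (alternative decomposition; same cost).


-- ===== PORT A =====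
def categorize_commit_py (message : String) (files_changed : List String) : String :=
  let message_lower := PySem.Str.lower message
  if ["constraint", "layout", "autolayout"].any (fun k => PySem.Str.isIn k message_lower) then
    "UI/Layout"
  else if ["navigation", "push", "present"].any (fun k => PySem.Str.isIn k message_lower) then
    "Navigation"
  else if ["build", "compile", "xcode"].any (fun k => PySem.Str.isIn k message_lower) then
    "Build/Compilation"
  else if ["api", "supabase", "network"].any (fun k => PySem.Str.isIn k message_lower) then
    "API Integration"
  else if !files_changed.isEmpty then
    if files_changed.any (fun f => PySem.Str.isIn "View" f || PySem.Str.isIn "UI" f) then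
      "UI/Layout"
    else if files_changed.any (fun f => PySem.Str.isIn "Service" f || PySem.Str.isIn "Manager" f) then
      "Architecture"
    else if files_changed.any (fun f => PySem.Str.isIn "Controller" f) then
      "Navigation"
    else "General"
  else "General"

-- ===== PORT B =====
-- one unified rule table in REVERSE priority order (lowest priority first); last match wins
def pvRules : List (String × List String × String) :=
  [ ("file", ["Controller"], "Navigation"),
    ("file", ["Service", "Manager"], "Architecture"),
    ("file", ["View", "UI"], "UI/Layout"),
    ("msg", ["api", "supabase", "network"], "API Integration"),
    ("msg", ["build", "compile", "xcode"], "Build/Compilation"),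
    ("msg", ["navigation", "push", "present"], "Navigation"),
    ("msg", ["constraint", "layout", "autolayout"], "UI/Layout") ]

def categorize_commit_py_alt (message : String) (files_changed : List String) : String :=
  let ml := PySem.Str.lower message
  pvRules.foldl
    (fun result rule =>
      let haystacks := if rule.1 == "msg" then [ml] else files_changed
      if haystacks.any (fun h => rule.2.1.any (fun p => PySem.Str.isIn p h)) then rule.2.2
      else result)
    "General"

-- ===== PRECONDITION & SPEC =====
def Spec_categorize_commit_py (message : String) (files_changed : List String) (out : String) : Prop := out = categorize_commit_py_alt message files_changed
instance (message : String) (files_changed : List String) (out : String) : Decidable (Spec_categorize_commit_py message files_changed out) := by unfold Spec_categorize_commit_py; infer_instance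

-- ===== CLAIM (what is proved, stated in full; the proofs are below) =====
def Claim_equal_categorize_commit_py : Prop := ∀ (message : String) (files_changed : List String), Dom_categorize_commit_py message files_changed → Spec_categorize_commit_py message files_changed (categorize_commit_py message files_changed)

-- ===== LEMMAS AND PROOFS =====

-- ===== VERDICT (by name: the statement is the Claim_ definition above) =====
theorem categorize_commit_py_spec : Claim_equal_categorize_commit_py := by
  intro message files_changed _
  unfold Spec_categorize_commit_py categorize_commit_py categorize_commit_py_alt
  simp only [pvRules, List.foldl, List.any_cons, List.any_nil, Bool.or_false, beq_iff_eq,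
    reduceCtorEq, ite_false, ite_true]
  split_ifs <;> simp_all
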